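-- pv_equiv track=rewrite | github.com/Sotelo-Nazareno/Python_Progra_1 | clase-9/Quest05-PaulinaCooks/funciones.py | buscar_elementos
-- ===== SOURCE A (Python) =====
-- def mapear_indice(seccion:str)->int:
--     """
--     Deriva una de las secciones (nombre, vistas, duracion) del video por un indice
--
--     :params: seccion(str) = La seccion que ingresara el usuario
--
--     :returs:
--     Devuelve el numero de indice
--     """
--
--     match seccion:
--         case "nombre":
--             return 0
--         case "vistas":
--             return 1
--         case "duracion":
--             return 2
--
-- def buscar_elementos(matriz:list[list],indice:str, modo:str)->list[list]:
--     """
--     Busca por toda la matriz el numero mas alto de vistas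
--
--     :params: matriz(list[list]) = La matrizx que ingrese el usuario
--
--     :returns:
--     Devuelve una matriz filtrada
--     """
--
--     indice_a_filtrar = mapear_indice(seccion=indice)
--     cantidad_columnas = len(matriz[indice_a_filtrar])
--     lista_seleccionado = []
--     seleccionado = matriz[indice_a_filtrar][0]
--
--     for indice_columna in range(cantidad_columnas):
--         valor_actual = matriz[indice_a_filtrar][indice_columna]
--         if(modo == "ASC" and seleccionado < valor_actual or
--             modo == "DES" and seleccionado > valor_actual):
--             seleccionado = valor_actual
--             lista_seleccionado = [valor_actual]
--         elif seleccionado == valor_actual: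
--             lista_seleccionado.append(valor_actual)
--
--     return lista_seleccionado
-- ===== SOURCE B (Python) =====
-- def mapear_indice(seccion: str) -> int:
--     match seccion:
--         case "nombre":
--             return 0
--         case "vistas":
--             return 1
--         case "duracion":
--             return 2
--
--
-- def buscar_elementos(matriz, indice, modo):
--     fila = matriz[mapear_indice(seccion=indice)]
--     primero = fila[0]
--     if modo == "ASC":
--         extremo = max(fila)
--     elif modo == "DES":
--         extremo = min(fila)
--     else:
--         extremo = primero
--     return [v for v in fila if v == extremo]
-- ===== Notes on version B (the rewrite author's own statement) =====
-- stated objective: simpler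
-- what changed: Replaced the single interleaved scan that tracks the running extreme while resetting/appending a tie list with a two-pass decomposition: compute the extreme (max/min/first depending on modo) and then filter the row for elements equal to it.
import Mathlib
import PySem

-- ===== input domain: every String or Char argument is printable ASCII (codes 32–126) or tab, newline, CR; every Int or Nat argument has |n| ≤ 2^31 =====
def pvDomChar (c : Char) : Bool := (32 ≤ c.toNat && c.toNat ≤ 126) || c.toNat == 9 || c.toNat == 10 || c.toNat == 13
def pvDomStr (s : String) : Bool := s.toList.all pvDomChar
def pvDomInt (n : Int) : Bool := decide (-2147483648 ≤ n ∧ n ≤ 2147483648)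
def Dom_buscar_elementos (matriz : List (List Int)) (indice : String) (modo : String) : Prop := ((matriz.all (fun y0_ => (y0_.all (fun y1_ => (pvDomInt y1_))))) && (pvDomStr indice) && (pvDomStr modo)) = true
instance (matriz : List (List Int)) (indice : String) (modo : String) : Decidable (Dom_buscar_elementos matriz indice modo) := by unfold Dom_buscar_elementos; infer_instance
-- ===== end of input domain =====

-- B replaces A's single interleaved extreme-tracking/tie-list-resetting scan with a simpler
-- two-pass decomposition (compute the extreme, then filter the row); same cost, no speed claim.

-- ===== PORT A =====
-- shared same-module helper (identical in Source A and Source B); falls off the match (returns None) for any other string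
def mapear_indice (seccion : String) : Option Int :=
  if seccion = "nombre" then some 0
  else if seccion = "vistas" then some 1
  else if seccion = "duracion" then some 2
  else none

def buscar_elementos (matriz : List (List Int)) (indice : String) (modo : String) : List Int :=
  match mapear_indice indice with
  | none => []   -- Python: matriz[None] raises TypeError (outside Pre_)
  | some idx =>
    match PySem.List.pyGet? matriz idx with
    | none => []   -- IndexError (outside Pre_)
    | some fila =>
      match PySem.List.pyGet? fila 0 with
      | none => []   -- IndexError on empty row (outside Pre_)
      | some sel0 =>
        (PySem.List.pyRange 0 (fila.length : Int) 1).foldl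
          (fun (st : Int × List Int) i =>
            let v := PySem.List.pyGetD fila i 0
            if (modo = "ASC" ∧ st.1 < v) ∨ (modo = "DES" ∧ st.1 > v) then (v, [v])
            else if st.1 = v then (st.1, st.2 ++ [v])
            else st)
          (sel0, []) |>.2

-- ===== PORT B =====
def buscar_elementos_alt (matriz : List (List Int)) (indice : String) (modo : String) : List Int :=
  match mapear_indice indice with
  | none => []   -- Python: matriz[None] raises TypeError (outside Pre_)
  | some idx =>
    match PySem.List.pyGet? matriz idx with
    | none => []   -- IndexError (outside Pre_)
    | some fila =>
      match PySem.List.pyGet? fila 0 with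
      | none => []   -- IndexError on empty row (outside Pre_)
      | some primero =>
        let extremo :=
          if modo = "ASC" then (PySem.List.max? fila id).getD primero
          else if modo = "DES" then (PySem.List.min? fila id).getD primero
          else primero
        fila.filter (fun v => v == extremo)

-- ===== PRECONDITION & SPEC =====
-- Pre_ = exactly the inputs where A returns: indice is one of the three known sections,
-- the selected row index exists, and the selected row is nonempty (else A raises).
def Pre_buscar_elementos (matriz : List (List Int)) (indice : String) (modo : String) : Prop :=
  (indice = "nombre" ∧ 1 ≤ matriz.length ∧ matriz.getD 0 [] ≠ []) ∨
  (indice = "vistas" ∧ 2 ≤ matriz.length ∧ matriz.getD 1 [] ≠ []) ∨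
  (indice = "duracion" ∧ 3 ≤ matriz.length ∧ matriz.getD 2 [] ≠ [])
instance (matriz : List (List Int)) (indice : String) (modo : String) : Decidable (Pre_buscar_elementos matriz indice modo) := by unfold Pre_buscar_elementos; infer_instance

def pvWitness_buscar_elementos : List (List Int) × String × String := ([[1, 3, 3], [2], [4]], "nombre", "ASC")

def Spec_buscar_elementos (matriz : List (List Int)) (indice : String) (modo : String) (out : List Int) : Prop := out = buscar_elementos_alt matriz indice modo
instance (matriz : List (List Int)) (indice : String) (modo : String) (out : List Int) : Decidable (Spec_buscar_elementos matriz indice modo out) := by unfold Spec_buscar_elementos; infer_instance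

-- ===== CLAIM (what is proved, stated in full; the proofs are below) =====
def Claim_equal_buscar_elementos : Prop := ∀ (matriz : List (List Int)) (indice : String) (modo : String), Dom_buscar_elementos matriz indice modo → Pre_buscar_elementos matriz indice modo → Spec_buscar_elementos matriz indice modo (buscar_elementos matriz indice modo)

-- ===== LEMMAS AND PROOFS =====

-- A's loop body once the modo tests are decided
def stepAsc (st : Int × List Int) (v : Int) : Int × List Int :=
  if st.1 < v then (v, [v]) else if st.1 = v then (st.1, st.2 ++ [v]) else st
def stepDes (st : Int × List Int) (v : Int) : Int × List Int :=
  if st.1 > v then (v, [v]) else if st.1 = v then (st.1, st.2 ++ [v]) else st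
def stepOther (st : Int × List Int) (v : Int) : Int × List Int :=
  if st.1 = v then (st.1, st.2 ++ [v]) else st

lemma foldl_min_le (t : List Int) : ∀ a : Int, t.foldl min a ≤ a := by
  induction t with
  | nil => intro a; simp
  | cons x xs ih => intro a; exact le_trans (ih _) (min_le_left _ _)

lemma ascLoop (xs : List Int) : ∀ (M : Int) (L : List Int),
    xs.foldl stepAsc (M, L) =
      (xs.foldl max M,
       (if xs.foldl max M = M then L else []) ++ xs.filter (fun v => v == xs.foldl max M)) := by
  induction xs with
  | nil => intro M L; simp
  | cons v rest ih =>
    intro M L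
    have hub := (PySem.List.le_foldl_max rest (max M v)).1
    by_cases h1 : M < v
    · have hv : max M v = v := max_eq_right h1.le
      rw [hv] at hub
      have hne : rest.foldl max v ≠ M := by omega
      simp only [List.foldl_cons, stepAsc, if_pos h1, ih, List.filter_cons, hv]
      rw [if_neg hne]
      by_cases h2 : v = rest.foldl max v
      · simp [← h2]
      · simp [h2, Ne.symm h2]
    · have hv : max M v = M := max_eq_left (by omega)
      rw [hv] at hub
      by_cases h2 : M = v
      · subst h2
        simp only [List.foldl_cons, stepAsc, if_neg h1, ih, List.filter_cons, hv]
        by_cases h3 : rest.foldl max M = M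
        · simp [h3]
        · simp [h3, Ne.symm h3]
      · have hvne : ¬ v = rest.foldl max M := by omega
        simp only [List.foldl_cons, stepAsc, if_neg h1, if_neg h2, ih, List.filter_cons, hv]
        simp [hvne]

lemma desLoop (xs : List Int) : ∀ (M : Int) (L : List Int),
    xs.foldl stepDes (M, L) =
      (xs.foldl min M,
       (if xs.foldl min M = M then L else []) ++ xs.filter (fun v => v == xs.foldl min M)) := by
  induction xs with
  | nil => intro M L; simp
  | cons v rest ih =>
    intro M L
    have hlb := foldl_min_le rest (min M v)
    by_cases h1 : M > v
    · have hv : min M v = v := min_eq_right h1.le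
      rw [hv] at hlb
      have hne : rest.foldl min v ≠ M := by omega
      simp only [List.foldl_cons, stepDes, if_pos h1, ih, List.filter_cons, hv]
      rw [if_neg hne]
      by_cases h2 : v = rest.foldl min v
      · simp [← h2]
      · simp [h2, Ne.symm h2]
    · have hv : min M v = M := min_eq_left (by omega)
      rw [hv] at hlb
      by_cases h2 : M = v
      · subst h2
        simp only [List.foldl_cons, stepDes, if_neg h1, ih, List.filter_cons, hv]
        by_cases h3 : rest.foldl min M = M
        · simp [h3]
        · simp [h3, Ne.symm h3]
      · have hvne : ¬ v = rest.foldl min M := by omega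
        simp only [List.foldl_cons, stepDes, if_neg h1, if_neg h2, ih, List.filter_cons, hv]
        simp [hvne]

lemma otherLoop (xs : List Int) : ∀ (M : Int) (L : List Int),
    xs.foldl stepOther (M, L) = (M, L ++ xs.filter (fun v => v == M)) := by
  induction xs with
  | nil => intro M L; simp
  | cons v rest ih =>
    intro M L
    by_cases h : M = v
    · subst h; simp [stepOther, ih]
    · simp [stepOther, h, ih, Ne.symm h]

-- Python max()/min() over a nonempty list, in foldl form
lemma max?_cons (p : Int) (rest : List Int) :
    PySem.List.max? (p :: rest) id = some (rest.foldl max p) := by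
  have go : ∀ (t : List Int) (m : Int),
      t.foldl (fun (acc : Option Int) (x : Int) =>
        acc.elim (some x) (fun m => if id m < id x then some x else some m)) (some m)
        = some (t.foldl max m) := by
    intro t
    induction t with
    | nil => intro m; simp
    | cons x xs ihx =>
      intro m
      simp only [List.foldl_cons, Option.elim_some]
      by_cases h : m < x
      · rw [if_pos (show id m < id x from h), ihx, max_eq_right h.le]
      · rw [if_neg (show ¬ id m < id x from h), ihx, max_eq_left (by omega)]
  simp only [PySem.List.max?, List.foldl_cons]
  refine Eq.trans ?_ (go rest p)
  congr 1
  funext acc x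
  cases acc <;> rfl

lemma min?_cons (p : Int) (rest : List Int) :
    PySem.List.min? (p :: rest) id = some (rest.foldl min p) := by
  have go : ∀ (t : List Int) (m : Int),
      t.foldl (fun (acc : Option Int) (x : Int) =>
        acc.elim (some x) (fun m => if id x < id m then some x else some m)) (some m)
        = some (t.foldl min m) := by
    intro t
    induction t with
    | nil => intro m; simp
    | cons x xs ihx =>
      intro m
      simp only [List.foldl_cons, Option.elim_some]
      by_cases h : x < m
      · rw [if_pos (show id x < id m from h), ihx, min_eq_right h.le]
      · rw [if_neg (show ¬ id x < id m from h), ihx, min_eq_left (by omega)]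
  simp only [PySem.List.min?, List.foldl_cons]
  refine Eq.trans ?_ (go rest p)
  congr 1
  funext acc x
  cases acc <;> rfl

-- the agreement for one fixed (existing, nonempty) row
lemma row_agree (fila : List Int) (modo : String) (p : Int) (rest : List Int)
    (hf : fila = p :: rest) :
    ((PySem.List.pyRange 0 (fila.length : Int) 1).foldl
        (fun (st : Int × List Int) i =>
          let v := PySem.List.pyGetD fila i 0
          if (modo = "ASC" ∧ st.1 < v) ∨ (modo = "DES" ∧ st.1 > v) then (v, [v])
          else if st.1 = v then (st.1, st.2 ++ [v])
          else st)
        (p, []) |>.2) =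
      fila.filter (fun v => v ==
        (if modo = "ASC" then (PySem.List.max? fila id).getD p
         else if modo = "DES" then (PySem.List.min? fila id).getD p
         else p)) := by
  have key : (List.foldl
      (fun (st : Int × List Int) (i : Int) =>
        let v := PySem.List.pyGetD fila i 0
        if (modo = "ASC" ∧ st.1 < v) ∨ (modo = "DES" ∧ st.1 > v) then (v, [v])
        else if st.1 = v then (st.1, st.2 ++ [v])
        else st)
      (p, []) (PySem.List.pyRange 0 (fila.length : Int) 1)) =
      List.foldl
      (fun (st : Int × List Int) (v : Int) =>
        if (modo = "ASC" ∧ st.1 < v) ∨ (modo = "DES" ∧ st.1 > v) then (v, [v])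
        else if st.1 = v then (st.1, st.2 ++ [v])
        else st)
      (p, []) fila :=
    PySem.List.foldl_pyRange_zero_pyGetD' fila 0
      (fun (st : Int × List Int) (v : Int) =>
        if (modo = "ASC" ∧ st.1 < v) ∨ (modo = "DES" ∧ st.1 > v) then (v, [v])
        else if st.1 = v then (st.1, st.2 ++ [v])
        else st)
      (p, [])
  rw [key]
  by_cases hA : modo = "ASC"
  · subst hA
    have e : (fun (st : Int × List Int) (v : Int) =>
        if ("ASC" = "ASC" ∧ st.1 < v) ∨ ("ASC" = "DES" ∧ st.1 > v) then (v, [v])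
        else if st.1 = v then (st.1, st.2 ++ [v]) else st) = stepAsc := by
      funext st v; simp [stepAsc]
    rw [e, ascLoop]
    simp [hf, max?_cons]
  · by_cases hD : modo = "DES"
    · subst hD
      have e : (fun (st : Int × List Int) (v : Int) =>
          if ("DES" = "ASC" ∧ st.1 < v) ∨ ("DES" = "DES" ∧ st.1 > v) then (v, [v])
          else if st.1 = v then (st.1, st.2 ++ [v]) else st) = stepDes := by
        funext st v; simp [stepDes]
      rw [e, desLoop]
      simp [hf, min?_cons]
    · have e : (fun (st : Int × List Int) (v : Int) =>
          if (modo = "ASC" ∧ st.1 < v) ∨ (modo = "DES" ∧ st.1 > v) then (v, [v])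
          else if st.1 = v then (st.1, st.2 ++ [v]) else st) = stepOther := by
        funext st v; simp [stepOther, hA, hD]
      rw [e, otherLoop]
      simp [hA, hD]

-- ===== VERDICT (by name: the statement is the Claim_ definition above) =====
theorem buscar_elementos_spec : Claim_equal_buscar_elementos := by
  intro matriz indice modo _ hpre
  unfold Spec_buscar_elementos buscar_elementos buscar_elementos_alt
  -- resolve the section index and the selected row from Pre_
  obtain ⟨fila, idx, hmapA, hrow, hne⟩ :
      ∃ (fila : List Int) (idx : Int), mapear_indice indice = some idx ∧
        PySem.List.pyGet? matriz idx = some fila ∧ fila ≠ [] := by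
    rcases hpre with ⟨hi, hl, hn⟩ | ⟨hi, hl, hn⟩ | ⟨hi, hl, hn⟩
    · match matriz, hl with
      | r0 :: rs, _ =>
        exact ⟨r0, 0, by simp [mapear_indice, hi],
          by simp [PySem.List.pyGet?, PySem.List.pyIdx?], by simpa using hn⟩
    · match matriz, hl with
      | r0 :: r1 :: rs, _ =>
        exact ⟨r1, 1, by simp [mapear_indice, hi],
          by simp [PySem.List.pyGet?, PySem.List.pyIdx?], by simpa using hn⟩
    · match matriz, hl with
      | r0 :: r1 :: r2 :: rs, _ =>
        exact ⟨r2, 2, by simp [mapear_indice, hi],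
          by simp [PySem.List.pyGet?, PySem.List.pyIdx?,
            show (2:Int) ≤ (rs.length:Int) + 1 + 1 by omega], by simpa using hn⟩
  obtain ⟨p, rest, hf⟩ : ∃ p rest, fila = p :: rest := by
    cases fila with
    | nil => exact absurd rfl hne
    | cons p rest => exact ⟨p, rest, rfl⟩
  have hhead : PySem.List.pyGet? fila 0 = some p := by
    simp [hf, PySem.List.pyGet?, PySem.List.pyIdx?]
  simp only [hmapA, hrow, hhead]
  exact row_agree fila modo p rest hf
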